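-- pv_equiv track=rewrite | github.com/Introduction-to-Programming-OSOWSKI/4-7-remove-evens-claytonfollett2021 | main.py | removeEvens
-- ===== SOURCE A (Python) =====
-- def removeEvens(k):
--     newlist = k
--     numPopped = 0
--     for i in range (0, len(k)):
--        if newlist[i - numPopped] % 2 == 0 and newlist[i - numPopped] != 0:
--            newlist.pop(i - numPopped)
--            numPopped = numPopped + 1
--
--     return newlist
-- ===== SOURCE B (Python) =====
-- def removeEvens(k):
--     w = 0
--     for x in k:
--         if x % 2 != 0 or x == 0:
--             k[w] = x
--             w += 1
--     del k[w:]
--     return k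
-- ===== Notes on version B (the rewrite author's own statement) =====
-- stated objective: faster
-- what changed: Replaces the pop-by-shifting-index loop (each pop shifts the whole tail) with a two-pointer in-place compaction: a write cursor copies kept elements forward and one final del truncates the tail.
import Mathlib
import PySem

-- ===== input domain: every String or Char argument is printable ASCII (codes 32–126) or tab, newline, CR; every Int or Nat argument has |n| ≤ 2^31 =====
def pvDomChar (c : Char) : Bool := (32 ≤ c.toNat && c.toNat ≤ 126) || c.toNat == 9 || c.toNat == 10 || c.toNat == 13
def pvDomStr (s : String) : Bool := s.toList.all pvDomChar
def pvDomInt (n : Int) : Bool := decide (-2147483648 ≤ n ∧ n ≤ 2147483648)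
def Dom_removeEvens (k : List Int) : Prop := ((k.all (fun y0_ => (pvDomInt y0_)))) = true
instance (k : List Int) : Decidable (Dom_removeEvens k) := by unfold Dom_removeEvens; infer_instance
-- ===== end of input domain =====

-- B replaces A's pop-by-shifting-index loop with a two-pointer in-place compaction (write
-- cursor + single truncation); both mutate and return the argument list object in Python —
-- the equivalence proved here is about the returned value.

-- ===== PORT A =====
-- step of A's for-loop: state (newlist, numPopped), index i
def removeEvensStep (s : List Int × Int) (i : Int) : List Int × Int :=
  match PySem.List.pyGet? s.1 (i - s.2) with
  | some x =>
    if PySem.Int.mod x 2 == 0 && x != 0 then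
      match PySem.List.pop? s.1 (i - s.2) with
      | some r => (r.2, s.2 + 1)
      | none => (s.1, s.2)   -- unreachable: the index was just read successfully
    else (s.1, s.2)
  | none => (s.1, s.2)       -- unreachable: 0 ≤ i - numPopped < len(newlist) always

def removeEvens (k : List Int) : List Int :=
  ((PySem.List.pyRange 0 (k.length : Int) 1).foldl removeEvensStep (k, 0)).1

-- ===== PORT B =====
-- step of B's for-loop: state (k, w), element x
def removeEvensAltStep (s : List Int × Int) (x : Int) : List Int × Int :=
  if PySem.Int.mod x 2 != 0 || x == 0 then (PySem.List.pySetD s.1 s.2 x, s.2 + 1) else s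

def removeEvens_alt (k : List Int) : List Int :=
  let s := k.foldl removeEvensAltStep (k, 0)
  PySem.List.slice s.1 none (some s.2)   -- del k[w:] leaves k[:w]

-- ===== PRECONDITION & SPEC =====
def Spec_removeEvens (k : List Int) (out : List Int) : Prop := out = removeEvens_alt k
instance (k : List Int) (out : List Int) : Decidable (Spec_removeEvens k out) := by unfold Spec_removeEvens; infer_instance

-- ===== CLAIM (what is proved, stated in full; the proofs are below) =====
def Claim_equal_removeEvens : Prop := ∀ (k : List Int), Dom_removeEvens k → Spec_removeEvens k (removeEvens k)

-- ===== LEMMAS AND PROOFS =====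

-- the elements both programs keep: odd, or zero
def pvKeep (x : Int) : Bool := !(PySem.Int.mod x 2 == 0 && x != 0)

lemma bool_not_true {b : Bool} (h : (!b) = true) : b = false := by cases b <;> simp_all
lemma bool_not_false {b : Bool} (h : ¬ ((!b) = true)) : b = true := by cases b <;> simp_all

lemma pvKeep_cond (x : Int) : (PySem.Int.mod x 2 != 0 || x == 0) = pvKeep x := by
  unfold pvKeep
  cases h1 : (PySem.Int.mod x 2 == 0) <;> cases h2 : (x == 0) <;>
    simp only [bne, h1, h2] <;> rfl

lemma eraseIdx_append_middle (F d : List Int) (x : Int) :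
    (F ++ x :: d).eraseIdx F.length = F ++ d := by
  induction F with
  | nil => simp
  | cons a F ih => simp [List.eraseIdx_cons_succ, ih]

lemma set_append_middle (F g : List Int) (x y : Int) :
    (F ++ y :: g).set F.length x = (F ++ [x]) ++ g := by
  induction F with
  | nil => simp
  | cons a F ih => simp [ih]

lemma pop_append_middle (F d : List Int) (x : Int) :
    PySem.List.pop? (F ++ x :: d) ((F.length : Int)) = some (x, F ++ d) := by
  have h := PySem.List.pop?_natCast (F ++ x :: d) F.length (by simp)
  rw [eraseIdx_append_middle] at h
  simp only [List.getElem_append_right (le_refl F.length)] at h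
  simpa using h

lemma loopA (d : List Int) : ∀ (F : List Int) (i : Int),
    ((PySem.List.pyRange i (i + (d.length : Int)) 1).foldl removeEvensStep
      (F ++ d, i - (F.length : Int))).1 = F ++ d.filter pvKeep := by
  induction d with
  | nil =>
    intro F i
    simp [PySem.List.pyRange_one_eq_nil]
  | cons x d ih =>
    intro F i
    have hpos : 0 < (x :: d).length := Nat.succ_pos _
    rw [PySem.List.pyRange_one_cons (by omega)]
    simp only [List.foldl_cons]
    have hidx : i - (i - (F.length : Int)) = (F.length : Int) := by omega
    have hget : PySem.List.pyGet? (F ++ x :: d) ((F.length : Int)) = some x := by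
      exact_mod_cast PySem.List.pyGet?_append_length F d x
    have hpop := pop_append_middle F d x
    have hstate : removeEvensStep (F ++ x :: d, i - (F.length : Int)) i =
        if (PySem.Int.mod x 2 == 0 && x != 0) then (F ++ d, i - (F.length : Int) + 1)
        else (F ++ x :: d, i - (F.length : Int)) := by
      simp only [removeEvensStep, hidx, hget, hpop]
    rw [hstate]
    have h1 : i + ((x :: d).length : Int) = (i + 1) + (d.length : Int) := by
      simp only [List.length_cons]; push_cast; ring
    by_cases hk : pvKeep x = true
    · have hc : (PySem.Int.mod x 2 == 0 && x != 0) = false := by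
        unfold pvKeep at hk; exact bool_not_true hk
      rw [if_neg (ne_true_of_eq_false hc)]
      have h2 : i - (F.length : Int) = (i + 1) - (((F ++ [x]).length : Int)) := by
        simp only [List.length_append, List.length_cons, List.length_nil]; push_cast; ring
      have h3 : F ++ x :: d = (F ++ [x]) ++ d := by simp
      rw [h1, h2, h3, ih (F ++ [x]) (i + 1)]
      simp [hk]
    · have hc : (PySem.Int.mod x 2 == 0 && x != 0) = true := by
        unfold pvKeep at hk; exact bool_not_false hk
      rw [if_pos hc]
      have h2 : i - (F.length : Int) + 1 = (i + 1) - (F.length : Int) := by omega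
      rw [h1, h2, ih F (i + 1)]
      simp [Bool.eq_false_iff.mpr hk]

lemma removeEvens_eq_filter (k : List Int) : removeEvens k = k.filter pvKeep := by
  have := loopA k [] 0
  simpa [removeEvens] using this

lemma loopB (d : List Int) : ∀ (F g : List Int), d.length ≤ g.length →
    d.foldl removeEvensAltStep (F ++ g, (F.length : Int)) =
      ((F ++ d.filter pvKeep) ++ g.drop (d.filter pvKeep).length,
        ((F.length + (d.filter pvKeep).length : Nat) : Int)) := by
  induction d with
  | nil =>
    intro F g _
    simp
  | cons x d ih =>
    intro F g hlen
    cases g with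
    | nil => simp at hlen
    | cons y g' =>
      simp only [List.foldl_cons]
      have hstep : removeEvensAltStep (F ++ y :: g', (F.length : Int)) x =
          if pvKeep x then ((F ++ [x]) ++ g', (((F ++ [x]).length : Int)))
          else (F ++ y :: g', (F.length : Int)) := by
        unfold removeEvensAltStep
        rw [pvKeep_cond]
        by_cases hk : pvKeep x = true
        · rw [if_pos hk, if_pos hk]
          have hset : PySem.List.pySetD (F ++ y :: g') ((F.length : Int)) x =
              (F ++ [x]) ++ g' := by
            have h := PySem.List.pySetD_natCast (F ++ y :: g') F.length x
            rw [set_append_middle] at h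
            exact_mod_cast h
          rw [hset]
          congr 1
          simp only [List.length_append, List.length_cons, List.length_nil]
          push_cast; ring
        · rw [if_neg hk, if_neg hk]
      rw [hstep]
      by_cases hk : pvKeep x = true
      · rw [if_pos hk]
        rw [ih (F ++ [x]) g' (by simp at hlen ⊢; omega)]
        refine Prod.ext ?_ ?_
        · simp [hk, List.append_assoc]
        · simp only [List.filter_cons, hk, if_pos, List.length_append,
            List.length_cons, List.length_nil]
          push_cast; ring
      · rw [if_neg hk]
        rw [ih F (y :: g') (by simp at hlen ⊢; omega)]
        simp [Bool.eq_false_iff.mpr hk]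

lemma removeEvens_alt_eq_filter (k : List Int) : removeEvens_alt k = k.filter pvKeep := by
  have h := loopB k [] k (le_refl _)
  simp only [List.nil_append, List.length_nil, Nat.cast_zero, Nat.zero_add] at h
  simp only [removeEvens_alt]
  rw [h]
  have hs := PySem.List.slice_to_natCast
    (xs := k.filter pvKeep ++ k.drop (k.filter pvKeep).length) (b := (k.filter pvKeep).length)
  rw [hs]
  rw [List.take_left]

-- ===== VERDICT (by name: the statement is the Claim_ definition above) =====
theorem removeEvens_spec : Claim_equal_removeEvens := by
  intro k _
  unfold Spec_removeEvens
  rw [removeEvens_eq_filter, removeEvens_alt_eq_filter]
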